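-- pv_equiv track=rewrite | github.com/Sergeony/algorithms_and_data_structures | lab_11.py | binary_insert_sort
-- ===== SOURCE A (Python) =====
-- def binary_insert_sort(array: list):
--     """ An insertion sort that uses binary search to find place where element should be entered.
--     """
--     comparisons = permutations = 0
--
--     for i in range(1, len(array)):
--         insertion_item = array[i]
--
--         pivot, add_comparisons = binary_search(array[0:i], insertion_item)
--         comparisons += add_comparisons
--
--         for j in range(i, pivot, -1):
--             array[j] = array[j-1]
--             permutations += 1
--
--         array[pivot] = insertion_item
--         permutations += 1
--
--     return array, comparisons, permutations
--
-- def binary_search(array: list, value: int) -> [int, int]: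
--     """ The algorithm to find a value index in a list in logN operations.
--     """
--     comparisons = 0
--
--     left_bound = 0
--     right_bound = len(array)
--
--     while left_bound < right_bound:
--         center = (left_bound + right_bound) // 2
--
--         if value < array[center]:
--             right_bound = center
--         elif value >= array[center]:
--             left_bound = center + 1
--         comparisons += 1
--
--     return right_bound, comparisons
-- ===== SOURCE B (Python) =====
-- def _insertion_point(items, value):
--     """Rightmost insertion point for value in the sorted list, found by a
--     recursive binary search, together with the number of comparisons made."""
--     def go(lo, hi):
--         if lo >= hi:
--             return lo, 0
--         mid = (lo + hi) // 2
--         if value < items[mid]: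
--             pos, comps = go(lo, mid)
--         else:
--             pos, comps = go(mid + 1, hi)
--         return pos, comps + 1
--     return go(0, len(items))
--
-- def binary_insert_sort(array: list):
--     """Functional binary insertion sort: grow a sorted list element by element,
--     counting binary-search comparisons and, per insertion, the elements moved
--     plus the write that places the item."""
--     comparisons = permutations = 0
--     result = array[:1]
--     for item in array[1:]:
--         pos, comps = _insertion_point(result, item)
--         comparisons += comps
--         permutations += len(result) - pos + 1
--         result.insert(pos, item)
--     array[:] = result
--     return array, comparisons, permutations
-- ===== Notes on version B (the rewrite author's own statement) =====
-- stated objective: alternative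
-- what changed: Replaces A's in-place sort (iterative while-loop binary search over a fresh prefix slice each step, then an index loop shifting elements one by one in the mutable array) by a functional rebuild: a recursive binary search returns the insertion point with its comparison count, the element is placed with list.insert, and the moves are counted arithmetically per insertion.
import Mathlib
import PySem

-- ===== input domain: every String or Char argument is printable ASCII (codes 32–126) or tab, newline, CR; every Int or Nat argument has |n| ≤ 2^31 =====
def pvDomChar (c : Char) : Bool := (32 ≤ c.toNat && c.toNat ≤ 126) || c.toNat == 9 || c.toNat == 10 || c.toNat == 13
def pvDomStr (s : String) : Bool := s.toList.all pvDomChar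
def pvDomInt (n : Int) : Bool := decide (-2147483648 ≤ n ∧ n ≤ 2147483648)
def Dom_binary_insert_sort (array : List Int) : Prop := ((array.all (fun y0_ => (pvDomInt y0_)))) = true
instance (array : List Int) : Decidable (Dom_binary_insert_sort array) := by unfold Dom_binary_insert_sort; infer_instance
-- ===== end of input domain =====

-- B rebuilds the sorted list functionally (recursive binary search + list.insert,
-- moves counted arithmetically) instead of A's in-place shifting with an iterative
-- search; same O(n^2) cost, alternative structure. Both Pythons mutate `array` in
-- place to the sorted order; the equivalence proved here is about the RETURN value.

-- ===== PORT A =====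
-- while left < right: … of A's binary_search; the loop strictly shrinks r-l, so a
-- fuel of len(array) (passed by binary_search) makes the same computation total
-- (indices are always in range, hence pyGetD)
def pvBsLoop (a : List Int) (value : Int) (fuel : Nat) (l r comps : Int) : Int × Int :=
  match fuel with
  | 0 => (r, comps)
  | fuel + 1 =>
    if l < r then
      let c := PySem.Int.floordiv (l + r) 2
      if value < PySem.List.pyGetD a c 0 then
        pvBsLoop a value fuel l c (comps + 1)
      else if value ≥ PySem.List.pyGetD a c 0 then
        pvBsLoop a value fuel (c + 1) r (comps + 1)
      else
        pvBsLoop a value fuel l r (comps + 1)  -- unreachable (the two tests are exhaustive)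
    else (r, comps)

def binary_search (array : List Int) (value : Int) : Int × Int :=
  pvBsLoop array value array.length 0 (array.length : Int) 0

def binary_insert_sort (array : List Int) : List Int × Int × Int :=
  (PySem.List.pyRange 1 (array.length : Int) 1).foldl
    (fun (st : List Int × Int × Int) i =>
      let a := st.1
      let insertion_item := PySem.List.pyGetD a i 0
      let bp := binary_search (PySem.List.slice a (some 0) (some i)) insertion_item
      let pivot := bp.1
      let comparisons := st.2.1 + bp.2
      let sp := (PySem.List.pyRange i pivot (-1)).foldl
        (fun (st2 : List Int × Int) j =>
          (PySem.List.pySetD st2.1 j (PySem.List.pyGetD st2.1 (j - 1) 0), st2.2 + 1))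
        (a, st.2.2)
      (PySem.List.pySetD sp.1 pivot insertion_item, comparisons, sp.2 + 1))
    (array, 0, 0)

-- ===== PORT B =====
-- Source B's recursive go(lo, hi); each call strictly shrinks hi-lo, so a fuel of
-- len(items) (passed by pvInsertionPoint) makes the same recursion total
def pvGo (items : List Int) (value : Int) (fuel : Nat) (lo hi : Int) : Int × Int :=
  match fuel with
  | 0 => (lo, 0)
  | fuel + 1 =>
    if lo ≥ hi then (lo, 0)
    else
      let mid := PySem.Int.floordiv (lo + hi) 2
      if value < PySem.List.pyGetD items mid 0 then
        let pc := pvGo items value fuel lo mid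
        (pc.1, pc.2 + 1)
      else
        let pc := pvGo items value fuel (mid + 1) hi
        (pc.1, pc.2 + 1)

def pvInsertionPoint (items : List Int) (value : Int) : Int × Int :=
  pvGo items value items.length 0 (items.length : Int)

def binary_insert_sort_alt (array : List Int) : List Int × Int × Int :=
  let st := (PySem.List.slice array (some 1) none).foldl
    (fun (st : List Int × Int × Int) item =>
      let pc := pvInsertionPoint st.1 item
      (PySem.List.insert st.1 pc.1 item,
       st.2.1 + pc.2,
       st.2.2 + (st.1.length : Int) - pc.1 + 1))
    (PySem.List.slice array none (some 1), 0, 0)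
  (st.1, st.2.1, st.2.2)

-- ===== PRECONDITION & SPEC =====
def Spec_binary_insert_sort (array : List Int) (out : List Int × Int × Int) : Prop := out = binary_insert_sort_alt array
instance (array : List Int) (out : List Int × Int × Int) : Decidable (Spec_binary_insert_sort array out) := by unfold Spec_binary_insert_sort; infer_instance

-- ===== CLAIM =====
def Claim_equal_binary_insert_sort : Prop := ∀ (array : List Int), Dom_binary_insert_sort array → Spec_binary_insert_sort array (binary_insert_sort array)

-- ===== LEMMAS AND PROOFS =====

-- A's iterative search and B's recursive search make the same branch decisions,
-- so they return the same point and the same count (no sortedness needed).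
theorem pv_search_eq (a : List Int) (v : Int) :
    ∀ (fuel : Nat) (l r comps : Int), l ≤ r → (r - l).toNat ≤ fuel →
    pvBsLoop a v fuel l r comps = ((pvGo a v fuel l r).1, comps + (pvGo a v fuel l r).2) := by
  intro fuel
  induction fuel with
  | zero =>
    intro l r comps hlr hfuel
    have : l = r := by omega
    simp [pvBsLoop, pvGo, this]
  | succ n ih =>
    intro l r comps hlr hfuel
    by_cases h : l < r
    · have hmid := PySem.Int.floordiv_two_mid_bounds (le_of_lt h)
      have hcr : PySem.Int.floordiv (l + r) 2 < r :=
        (PySem.Int.floordiv_lt_iff_lt_mul (by omega)).2 (by omega)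
      rw [pvBsLoop, pvGo]
      simp only [if_pos h, if_neg (by omega : ¬ l ≥ r)]
      by_cases hv : v < PySem.List.pyGetD a (PySem.Int.floordiv (l + r) 2) 0
      · rw [if_pos hv, if_pos hv,
          ih l (PySem.Int.floordiv (l + r) 2) (comps + 1) (by omega) (by omega)]
        simp only [Prod.mk.injEq]
        exact ⟨by trivial, by ring⟩
      · rw [if_neg hv, if_neg hv,
          if_pos (by omega : v ≥ PySem.List.pyGetD a (PySem.Int.floordiv (l + r) 2) 0),
          ih (PySem.Int.floordiv (l + r) 2 + 1) r (comps + 1) (by omega) (by omega)]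
        simp only [Prod.mk.injEq]
        exact ⟨by trivial, by ring⟩
    · have : l = r := by omega
      rw [pvBsLoop, pvGo]
      simp [this]

-- the point B's search returns stays within [lo, hi]
theorem pv_go_bounds (a : List Int) (v : Int) :
    ∀ (fuel : Nat) (l r : Int), l ≤ r →
    l ≤ (pvGo a v fuel l r).1 ∧ (pvGo a v fuel l r).1 ≤ r := by
  intro fuel
  induction fuel with
  | zero => intro l r hlr; simp [pvGo]; omega
  | succ n ih =>
    intro l r hlr
    rw [pvGo]
    by_cases h : l ≥ r
    · simp [h]; omega
    · have hmid := PySem.Int.floordiv_two_mid_bounds (by omega : l ≤ r)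
      have hcr : PySem.Int.floordiv (l + r) 2 < r :=
        (PySem.Int.floordiv_lt_iff_lt_mul (by omega)).2 (by omega)
      simp only [if_neg h]
      by_cases hv : v < PySem.List.pyGetD a (PySem.Int.floordiv (l + r) 2) 0
      · simp only [if_pos hv]
        have := ih l (PySem.Int.floordiv (l + r) 2) (by omega)
        constructor <;> omega
      · simp only [if_neg hv]
        have := ih (PySem.Int.floordiv (l + r) 2 + 1) r (by omega)
        constructor <;> omega

theorem pv_getD_mid (l : List Int) (y : Int) (ys : List Int) :
    PySem.List.pyGetD (l ++ y :: ys) (l.length : Int) 0 = y := by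
  rw [PySem.List.pyGetD_natCast]
  induction l with
  | nil => rfl
  | cons a t ih => simp

theorem pv_set_mid (l : List Int) (y v : Int) (ys : List Int) :
    (l ++ y :: ys).set l.length v = l ++ v :: ys := by
  simp

-- the shift loop alone: positions k+1..i get the old k..i-1, position k keeps its value
theorem pv_shift_loop (k : Nat) :
    ∀ (pre : List Int) (y : Int) (rest : List Int) (perms : Int), k ≤ pre.length →
    (PySem.List.pyRange (pre.length : Int) (k : Int) (-1)).foldl
      (fun (st2 : List Int × Int) j =>
        (PySem.List.pySetD st2.1 j (PySem.List.pyGetD st2.1 (j - 1) 0), st2.2 + 1))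
      (pre ++ y :: rest, perms)
    = (pre.take k ++ (pre ++ [y]).getD k 0 :: (pre.drop k ++ rest),
       perms + ((pre.length : Int) - k)) := by
  intro pre
  induction pre using List.reverseRecOn with
  | nil =>
    intro y rest perms hk
    have hk0 : k = 0 := Nat.le_zero.mp (by simpa using hk)
    subst hk0
    rw [PySem.List.pyRange_neg_one_eq_nil (by simp)]
    simp
  | append_singleton q z ih =>
    intro y rest perms hk
    by_cases hcase : k = q.length + 1
    · rw [PySem.List.pyRange_neg_one_eq_nil (by simp [hcase])]
      have h1 : (q ++ [z]).take k = q ++ [z] := by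
        rw [List.take_of_length_le (by simp [hcase])]
      have h2 : (q ++ [z]).drop k = [] := by
        rw [List.drop_of_length_le (by simp [hcase])]
      have h3 : ((q ++ [z]) ++ [y]).getD k 0 = y := by
        rw [List.getD_eq_getElem _ _ (by simp [hcase])]
        rw [List.getElem_append_right (by simp [hcase])]
        simp [hcase]
      rw [h1, h2, h3]
      simp [hcase]
    · have hlen : (q ++ [z]).length = q.length + 1 := by simp
      have hk2 : k ≤ q.length := by omega
      rw [PySem.List.pyRange_neg_one_cons (by simp; omega)]
      simp only [List.foldl_cons]
      have hget : PySem.List.pyGetD ((q ++ [z]) ++ y :: rest) (((q ++ [z]).length : Int) - 1) 0 = z := by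
        have hx : (q ++ [z]) ++ y :: rest = q ++ z :: (y :: rest) := by simp
        have hi : ((q ++ [z]).length : Int) - 1 = (q.length : Int) := by simp
        rw [hx, hi, pv_getD_mid]
      have hset : PySem.List.pySetD ((q ++ [z]) ++ y :: rest) ((q ++ [z]).length : Int) z
          = q ++ z :: (z :: rest) := by
        rw [show ((q ++ [z]).length : Int) = (((q ++ [z]).length : Nat) : Int) from rfl,
          PySem.List.pySetD_natCast, pv_set_mid]
        simp
      rw [hget, hset]
      have htail : ((q ++ [z]).length : Int) - 1 = ((q.length : Nat) : Int) := by simp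
      rw [htail]
      have := ih z (z :: rest) (perms + 1) hk2
      rw [this]
      have ht : (q ++ [z]).take k = q.take k := List.take_append_of_le_length hk2
      have hd : (q ++ [z]).drop k = q.drop k ++ [z] := List.drop_append_of_le_length hk2
      have hg : ((q ++ [z]) ++ [y]).getD k 0 = (q ++ [z]).getD k 0 := by
        rw [List.getD_eq_getElem _ _ (by simp; omega), List.getD_eq_getElem _ _ (by simp; omega)]
        rw [List.getElem_append_left (by simp; omega)]
      rw [ht, hd, hg]
      simp only [List.append_assoc, List.cons_append, List.nil_append, hlen, Prod.mk.injEq]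
      exact ⟨trivial, by push_cast; ring⟩

-- the shift loop followed by the write at pivot = functional insertion at position k
theorem pv_shift_eq (pre : List Int) (x : Int) (rest : List Int) (k : Nat) (perms : Int)
    (hk : k ≤ pre.length) :
    (let sp := (PySem.List.pyRange (pre.length : Int) (k : Int) (-1)).foldl
        (fun (st2 : List Int × Int) j =>
          (PySem.List.pySetD st2.1 j (PySem.List.pyGetD st2.1 (j - 1) 0), st2.2 + 1))
        (pre ++ x :: rest, perms)
     (PySem.List.pySetD sp.1 (k : Int) x, sp.2))
    = (pre.take k ++ x :: (pre.drop k ++ rest), perms + ((pre.length : Int) - k)) := by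
  simp only [pv_shift_loop k pre x rest perms hk]
  rw [PySem.List.pySetD_natCast]
  have hlt : (pre.take k).length = k := by simp [hk]
  set l := pre.take k with hl
  rw [← hlt, pv_set_mid]

-- main loop correspondence: A's in-place pass over pre ++ suffix tracks B's
-- functional fold over suffix with accumulated list pre, step by step
theorem pv_main (suffix : List Int) :
    ∀ (pre : List Int) (comps perms : Int),
    (PySem.List.pyRange (pre.length : Int) ((pre.length : Int) + (suffix.length : Int)) 1).foldl
      (fun (st : List Int × Int × Int) i =>
        let a := st.1
        let insertion_item := PySem.List.pyGetD a i 0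
        let bp := binary_search (PySem.List.slice a (some 0) (some i)) insertion_item
        let pivot := bp.1
        let comparisons := st.2.1 + bp.2
        let sp := (PySem.List.pyRange i pivot (-1)).foldl
          (fun (st2 : List Int × Int) j =>
            (PySem.List.pySetD st2.1 j (PySem.List.pyGetD st2.1 (j - 1) 0), st2.2 + 1))
          (a, st.2.2)
        (PySem.List.pySetD sp.1 pivot insertion_item, comparisons, sp.2 + 1))
      (pre ++ suffix, comps, perms)
    = suffix.foldl
        (fun (st : List Int × Int × Int) item =>
          let pc := pvInsertionPoint st.1 item
          (PySem.List.insert st.1 pc.1 item,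
           st.2.1 + pc.2,
           st.2.2 + (st.1.length : Int) - pc.1 + 1))
        (pre, comps, perms) := by
  induction suffix with
  | nil =>
    intro pre comps perms
    rw [PySem.List.pyRange_one_eq_nil (by simp)]
    simp
  | cons x t ih =>
    intro pre comps perms
    rw [PySem.List.pyRange_one_cons (by push_cast [List.length_cons]; omega)]
    have hitem : PySem.List.pyGetD (pre ++ x :: t) (pre.length : Int) 0 = x := pv_getD_mid pre x t
    have hslice : PySem.List.slice (pre ++ x :: t) (some 0) (some (pre.length : Int)) = pre := by
      rw [PySem.List.slice_zero_start, PySem.List.slice_to_natCast]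
      exact List.take_left
    have hbounds := pv_go_bounds pre x pre.length 0 (pre.length : Int) (by omega)
    have hbs : binary_search pre x
        = ((pvInsertionPoint pre x).1, (pvInsertionPoint pre x).2) := by
      rw [binary_search, pvInsertionPoint,
        pv_search_eq pre x pre.length 0 (pre.length : Int) 0 (by omega) (by omega)]
      simp
    set p := (pvInsertionPoint pre x).1 with hp
    have hp0 : 0 ≤ p := hbounds.1
    have hplen : p ≤ (pre.length : Int) := hbounds.2
    have hpk : p = ((p.toNat : Nat) : Int) := by omega
    have hshift := pv_shift_eq pre x t p.toNat perms (by omega)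
    simp only at hshift
    have h1 := congrArg Prod.fst hshift
    have h2 := congrArg Prod.snd hshift
    simp only at h1 h2
    simp only [List.foldl_cons, hitem, hslice, hbs, ← hp]
    rw [hpk, h1, h2]
    have hfull : pre.take p.toNat ++ x :: (pre.drop p.toNat ++ t)
        = (pre.take p.toNat ++ x :: pre.drop p.toNat) ++ t := by simp
    have hlen' : (pre.take p.toNat ++ x :: pre.drop p.toNat).length = pre.length + 1 := by
      simp
    have e1 : (pre.length : Int) + 1
        = ((pre.take p.toNat ++ x :: pre.drop p.toNat).length : Int) := by
      rw [hlen']; omega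
    have e2 : (pre.length : Int) + ((x :: t).length : Int)
        = ((pre.take p.toNat ++ x :: pre.drop p.toNat).length : Int) + (t.length : Int) := by
      rw [hlen', List.length_cons]; omega
    rw [hfull, e1, e2, ih,
      PySem.List.insert_natCast pre p.toNat x (by omega)]
    have harith : perms + ((pre.length : Int) - ((p.toNat : Nat) : Int)) + 1
        = perms + (pre.length : Int) - ((p.toNat : Nat) : Int) + 1 := by ring
    rw [harith]

-- ===== VERDICT (by name: the statement is the Claim_ definition above) =====
theorem binary_insert_sort_spec : Claim_equal_binary_insert_sort := by
  intro array _
  show binary_insert_sort array = binary_insert_sort_alt array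
  cases array with
  | nil => decide
  | cons a rest =>
    unfold binary_insert_sort binary_insert_sort_alt
    have h1 : PySem.List.slice (a :: rest) (some 1) none = rest := by
      rw [PySem.List.slice_from_one]; rfl
    have h2 : PySem.List.slice (a :: rest) none (some 1) = [a] := by
      rw [show (1 : Int) = ((1 : Nat) : Int) from rfl, PySem.List.slice_to_natCast]; rfl
    rw [h1, h2]
    have hm := pv_main rest [a] 0 0
    have ebound : (((a :: rest).length : Nat) : Int) = 1 + (rest.length : Int) := by
      push_cast [List.length_cons]; ring
    rw [ebound]
    simp only [List.length_cons, List.length_nil, List.singleton_append, Nat.cast_one,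
      zero_add] at hm
    exact hm
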